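-- pv_equiv track=rewrite | github.com/gan-ta/Algorithm | programmers/Kakao/수식 최대화.py | minus_operation
-- ===== SOURCE A (Python) =====
-- def minus_operation(numbers,operators):
--     re_numbers = [numbers[0]]
--
--     for i in range(1,len(numbers)):
--         if operators[i-1] != '-':
--             re_numbers.append(numbers[i])
--         else:
--             re_numbers[len(re_numbers) - 1] = \
--                 str(int(re_numbers[len(re_numbers) - 1]) - int(numbers[i]))
--
--     while '-' in operators:
--         operators.remove('-')
--
--     return re_numbers,operators
-- ===== SOURCE B (Python) =====
-- def minus_operation(numbers, operators):
--     # Partition positions by the cut points where a non-'-' operator separates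
--     # two numbers, then fold each minus-connected segment on its own.
--     n = len(numbers)
--     cuts = [i + 1 for i in range(n - 1) if operators[i] != '-']
--     bounds = [0] + cuts + [n]
--     re_numbers = []
--     for s, e in zip(bounds, bounds[1:]):
--         v = numbers[s]
--         for j in range(s + 1, e):
--             v = str(int(v) - int(numbers[j]))
--         re_numbers.append(v)
--     operators[:] = [o for o in operators if o != '-']
--     return re_numbers, operators
-- ===== Notes on version B (the rewrite author's own statement) =====
-- stated objective: alternative
-- what changed: A does one online pass that appends or destructively folds into the last slot of the result list; B first computes the cut positions (non-'-' operators), partitions the index range into minus-connected segments via a bounds list, folds each segment independently, and strips '-' with a single filter comprehension instead of A's repeated while/remove scan.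
import Mathlib
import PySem

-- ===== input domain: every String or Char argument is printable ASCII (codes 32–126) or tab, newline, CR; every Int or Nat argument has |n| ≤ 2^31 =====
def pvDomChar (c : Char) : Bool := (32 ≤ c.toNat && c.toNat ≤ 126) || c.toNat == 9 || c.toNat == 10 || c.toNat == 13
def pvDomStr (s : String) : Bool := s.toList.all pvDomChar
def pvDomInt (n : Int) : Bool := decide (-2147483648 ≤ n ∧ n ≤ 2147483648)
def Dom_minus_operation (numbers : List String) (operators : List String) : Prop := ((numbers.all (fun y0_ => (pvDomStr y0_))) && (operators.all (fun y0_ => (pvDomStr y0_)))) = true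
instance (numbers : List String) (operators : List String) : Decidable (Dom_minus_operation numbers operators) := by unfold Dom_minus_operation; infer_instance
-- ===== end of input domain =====

-- B partitions the index range at non-'-' operators and folds each minus-connected
-- segment independently (and strips '-' with one filter instead of A's while/remove);
-- same return value as A; like A, the Python B mutates `operators` in place.


-- ===== PORT A =====
-- str(int(v) - int(y)) — the folding expression both Python sources contain verbatim
def pvCombine (v y : String) : String :=
  PySem.Int.toStr ((PySem.Int.ofStr? v).getD 0 - (PySem.Int.ofStr? y).getD 0)

-- while '-' in operators: operators.remove('-')
def stripMinusA (ops : List String) : List String :=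
  match h : PySem.List.remove? ops "-" with
  | some ops' => stripMinusA ops'
  | none => ops
termination_by ops.length
decreasing_by
  have hm : "-" ∈ ops := by
    by_contra hn
    rw [(PySem.List.remove?_eq_none_iff _ _).mpr hn] at h
    cases h
  rw [PySem.List.remove?_eq_some_erase ops "-" hm] at h
  injection h with h'
  subst h'
  have h1 := List.length_erase_of_mem hm
  have h2 : ops ≠ [] := by rintro rfl; cases hm
  have h3 : 0 < ops.length := List.length_pos_iff.mpr h2
  omega

def minus_operation (numbers : List String) (operators : List String) : List String × List String :=
  let re := (PySem.List.pyRange 1 (numbers.length : Int) 1).foldl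
    (fun re i =>
      if PySem.List.pyGetD operators (i - 1) "" ≠ "-" then
        re ++ [PySem.List.pyGetD numbers i ""]
      else
        re.set (re.length - 1) (pvCombine (re.getD (re.length - 1) "") (PySem.List.pyGetD numbers i "")))
    [PySem.List.pyGetD numbers 0 ""]
  (re, stripMinusA operators)

-- ===== PORT B =====
-- v = numbers[s]; for j in range(s+1, e): v = str(int(v) - int(numbers[j]))
def pvGroupFold (numbers : List String) (s e : Int) : String :=
  (PySem.List.pyRange (s + 1) e 1).foldl
    (fun v j => pvCombine v (PySem.List.pyGetD numbers j ""))
    (PySem.List.pyGetD numbers s "")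

def minus_operation_alt (numbers : List String) (operators : List String) : List String × List String :=
  let n : Int := numbers.length
  let cuts := ((PySem.List.pyRange 0 (n - 1) 1).filter
      (fun i => PySem.List.pyGetD operators i "" != "-")).map (fun i => i + 1)
  let bounds := 0 :: cuts ++ [n]
  let re := (bounds.zip bounds.tail).foldl (fun acc se => acc ++ [pvGroupFold numbers se.1 se.2]) []
  (re, operators.filter (fun o => o != "-"))

-- ===== PRECONDITION & SPEC =====
-- Pre_ excludes exactly the inputs where the Python A raises: empty `numbers` /
-- too-short `operators` (IndexError) and an int() ValueError on a string that is
-- the head or a member of a minus-connected group.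
def Pre_minus_operation (numbers : List String) (operators : List String) : Prop :=
  numbers ≠ [] ∧ numbers.length ≤ operators.length + 1 ∧
  ∀ i < numbers.length, 1 ≤ i → operators.getD (i - 1) "" = "-" →
    (PySem.Int.ofStr? (numbers.getD (i - 1) "")).isSome = true ∧
    (PySem.Int.ofStr? (numbers.getD i "")).isSome = true
instance (numbers : List String) (operators : List String) : Decidable (Pre_minus_operation numbers operators) := by
  unfold Pre_minus_operation; infer_instance

def pvWitness_minus_operation : List String × List String := (["1", "2", "3"], ["-", "+"])

def Spec_minus_operation (numbers : List String) (operators : List String) (out : List String × List String) : Prop := out = minus_operation_alt numbers operators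
instance (numbers : List String) (operators : List String) (out : List String × List String) : Decidable (Spec_minus_operation numbers operators out) := by unfold Spec_minus_operation; infer_instance

-- ===== CLAIM (what is proved, stated in full; the proofs are below) =====
def Claim_equal_minus_operation : Prop := ∀ (numbers : List String) (operators : List String), Dom_minus_operation numbers operators → Pre_minus_operation numbers operators → Spec_minus_operation numbers operators (minus_operation numbers operators)

-- ===== LEMMAS AND PROOFS =====

-- A's loop body, at Nat level (k = i - 1)
def stepA (operators numbers : List String) (re : List String) (k : Nat) : List String :=
  if operators.getD k "" ≠ "-" then re ++ [numbers.getD (k + 1) ""]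
  else re.set (re.length - 1) (pvCombine (re.getD (re.length - 1) "") (numbers.getD (k + 1) ""))

-- B's per-segment fold, at Nat level
def gv (numbers : List String) (s e : Nat) : String :=
  (List.range (e - (s + 1))).foldl (fun v k => pvCombine v (numbers.getD (s + 1 + k) "")) (numbers.getD s "")

-- B's cut positions, at Nat level
def cutsN (operators : List String) (m : Nat) : List Nat :=
  ((List.range m).filter (fun k => operators.getD k "" != "-")).map (fun k => k + 1)

-- consecutive pairs of a list
def zp {α : Type} (l : List α) : List (α × α) := l.zip l.tail

theorem zp_concat {α : Type} (l : List α) (h : l ≠ []) (x : α) :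
    zp (l ++ [x]) = zp l ++ [(l.getLast h, x)] := by
  induction l with
  | nil => exact absurd rfl h
  | cons a t ih =>
    cases t with
    | nil => simp [zp]
    | cons b t' =>
      have := ih (by simp)
      simp only [zp, List.cons_append, List.zip_cons_cons, List.tail_cons] at *
      simp [this, List.getLast]

theorem filter_erase_aux (l : List String) :
    (l.erase "-").filter (fun o => o != "-") = l.filter (fun o => o != "-") := by
  induction l with
  | nil => simp
  | cons b t ih =>
    by_cases hb : b = "-"
    · subst hb; simp [List.erase_cons_head]
    · rw [List.erase_cons_tail (by simp [hb])]
      simp [List.filter_cons, ih]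

theorem stripMinusA_eq_filter (ops : List String) :
    stripMinusA ops = ops.filter (fun o => o != "-") := by
  induction ops using stripMinusA.induct with
  | case1 ops ops' h ih =>
    have hm : "-" ∈ ops := by
      by_contra hn
      rw [(PySem.List.remove?_eq_none_iff _ _).mpr hn] at h
      cases h
    have he : ops' = ops.erase "-" := by
      have h2 := PySem.List.remove?_eq_some_erase ops "-" hm
      rw [h] at h2; simpa using h2
    rw [stripMinusA.eq_def, h]
    simp only []
    rw [ih, he, filter_erase_aux]
  | case2 ops h =>
    rw [stripMinusA.eq_def, h]
    have hm : "-" ∉ ops := (PySem.List.remove?_eq_none_iff _ _).mp h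
    have hall : ∀ a ∈ ops, (a != "-") = true := by
      intro a ha; simp; rintro rfl; exact hm ha
    rw [List.filter_eq_self.mpr hall]

theorem gv_single (numbers : List String) (s : Nat) : gv numbers s (s + 1) = numbers.getD s "" := by
  simp [gv]

theorem gv_extend (numbers : List String) (s m : Nat) (hs : s ≤ m) :
    gv numbers s (m + 1 + 1) = pvCombine (gv numbers s (m + 1)) (numbers.getD (m + 1) "") := by
  unfold gv
  have h1 : m + 1 + 1 - (s + 1) = (m + 1 - (s + 1)) + 1 := by omega
  rw [h1, List.range_succ, List.foldl_append]
  simp only [List.foldl_cons, List.foldl_nil]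
  have hidx : s + 1 + (m + 1 - (s + 1)) = m + 1 := by omega
  rw [hidx]

theorem main_invariant (numbers operators : List String) (m : Nat) :
    (List.range m).foldl (stepA operators numbers) [numbers.getD 0 ""] =
    (zp (0 :: cutsN operators m ++ [m + 1])).map (fun p => gv numbers p.1 p.2) := by
  induction m with
  | zero => simp [cutsN, zp, gv_single]
  | succ m ih =>
    rw [List.range_succ, List.foldl_append, List.foldl_cons, List.foldl_nil, ih]
    have hlast_le : ∀ s ∈ (0 : Nat) :: cutsN operators m, s ≤ m := by
      intro s hs
      rw [List.mem_cons] at hs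
      rcases hs with rfl | hs'
      · omega
      · simp [cutsN] at hs'
        obtain ⟨k, hk, rfl⟩ := hs'
        omega
    set L : List Nat := 0 :: cutsN operators m with hL
    have hLne : L ≠ [] := by simp [hL]
    have hs_le : L.getLast hLne ≤ m := hlast_le _ (List.getLast_mem hLne)
    unfold stepA
    by_cases hop : operators.getD m "" ≠ "-"
    · rw [if_pos hop]
      have hcuts : cutsN operators (m + 1) = cutsN operators m ++ [m + 1] := by
        simp [cutsN, List.range_succ, List.filter_append]
        intro hcon
        rw [List.getD_eq_getElem?_getD] at hop
        exact absurd hcon hop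
      rw [hcuts]
      have hre : (0 : Nat) :: (cutsN operators m ++ [m + 1]) ++ [m + 1 + 1] =
          (L ++ [m + 1]) ++ [m + 1 + 1] := by simp [hL]
      rw [hre]
      rw [zp_concat (L ++ [m + 1]) (by simp) (m + 1 + 1), List.getLast_concat]
      rw [List.map_append]
      simp [gv_single numbers (m + 1)]
    · rw [if_neg hop]
      rw [not_not] at hop
      have hop' : operators[m]?.getD "" = "-" := by
        rw [List.getD_eq_getElem?_getD] at hop
        exact hop
      have hcuts : cutsN operators (m + 1) = cutsN operators m := by
        simp [cutsN, List.range_succ, List.filter_append, hop']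
      rw [hcuts]
      have hre1 : (0 : Nat) :: cutsN operators m ++ [m + 1] = L ++ [m + 1] := by simp [hL]
      have hre2 : (0 : Nat) :: cutsN operators m ++ [m + 1 + 1] = L ++ [m + 1 + 1] := by simp [hL]
      rw [hre1, hre2]
      rw [zp_concat L hLne (m + 1), zp_concat L hLne (m + 1 + 1)]
      simp only [List.map_append, List.map_cons, List.map_nil]
      set front := (zp L).map (fun p => gv numbers p.1 p.2) with hfront
      have hlen : (front ++ [gv numbers (L.getLast hLne) (m + 1)]).length - 1 = front.length := by
        simp
      rw [hlen]
      have hgetD : (front ++ [gv numbers (L.getLast hLne) (m + 1)]).getD front.length "" =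
          gv numbers (L.getLast hLne) (m + 1) := by simp
      have hset : ∀ v, (front ++ [gv numbers (L.getLast hLne) (m + 1)]).set front.length v = front ++ [v] := by
        intro v; simp
      rw [hgetD, hset]
      rw [← gv_extend numbers _ m hs_le]

theorem A_norm (numbers operators : List String) :
    (minus_operation numbers operators).1 =
    (List.range (numbers.length - 1)).foldl (stepA operators numbers) [numbers.getD 0 ""] := by
  unfold minus_operation
  simp only []
  rw [PySem.List.pyRange_one, List.foldl_map]
  have hcnt : ((numbers.length : Int) - 1).toNat = numbers.length - 1 := by omega
  rw [hcnt]
  have hinit : PySem.List.pyGetD numbers 0 "" = numbers.getD 0 "" := by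
    simp [PySem.List.pyGetD_zero]
  rw [hinit]
  apply PySem.List.foldl_congr_mem
  intro acc k _
  unfold stepA
  have h1 : (1 : Int) + (k : Int) - 1 = ((k : Nat) : Int) := by ring
  have h2 : (1 : Int) + (k : Int) = (((k + 1 : Nat)) : Int) := by push_cast; ring
  rw [h1, h2, PySem.List.pyGetD_natCast, PySem.List.pyGetD_natCast]

theorem groupFold_cast (numbers : List String) (s e : Nat) :
    pvGroupFold numbers (s : Int) (e : Int) = gv numbers s e := by
  unfold pvGroupFold gv
  rw [PySem.List.pyRange_one, List.foldl_map]
  have hcnt : ((e : Int) - ((s : Int) + 1)).toNat = e - (s + 1) := by omega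
  rw [hcnt]
  have hinit : PySem.List.pyGetD numbers (s : Int) "" = numbers.getD s "" := by simp
  rw [hinit]
  apply PySem.List.foldl_congr_mem
  intro acc k _
  have h2 : (s : Int) + 1 + (k : Int) = (((s + 1 + k : Nat)) : Int) := by push_cast; ring
  rw [h2, PySem.List.pyGetD_natCast]

theorem B_norm (numbers operators : List String) :
    (minus_operation_alt numbers operators).1 =
    (zp (0 :: cutsN operators (numbers.length - 1) ++ [numbers.length])).map (fun p => gv numbers p.1 p.2) := by
  unfold minus_operation_alt
  simp only []
  have hcuts : ((PySem.List.pyRange 0 ((numbers.length : Int) - 1) 1).filter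
      (fun i => PySem.List.pyGetD operators i "" != "-")).map (fun i => i + 1) =
      (cutsN operators (numbers.length - 1)).map (fun (k : Nat) => (k : Int)) := by
    rw [PySem.List.pyRange_one]
    rw [List.filter_map]
    have hcnt : ((numbers.length : Int) - 1 - 0).toNat = numbers.length - 1 := by omega
    rw [hcnt]
    unfold cutsN
    rw [List.map_map, List.map_map]
    congr 1
    · funext k
      simp [Function.comp]
    · apply List.filter_congr
      intro k _
      simp [Function.comp]
  rw [hcuts]
  set cN := cutsN operators (numbers.length - 1) with hcN
  have hbounds : (0 : Int) :: (cN.map (fun (k : Nat) => (k : Int))) ++ [(numbers.length : Int)] =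
      ((0 :: cN ++ [numbers.length]).map (fun (k : Nat) => (k : Int))) := by
    simp
  rw [hbounds]
  rw [PySem.List.foldl_append_singleton_eq_map]
  rw [← List.map_tail, List.zip_map, List.map_map]
  show ((0 :: cN ++ [numbers.length]).zip (0 :: cN ++ [numbers.length]).tail).map _ = _
  unfold zp
  apply List.map_congr_left
  intro p _
  simp [Function.comp, groupFold_cast]

-- ===== VERDICT (by name: the statement is the Claim_ definition above) =====
theorem minus_operation_spec : Claim_equal_minus_operation := by
  intro numbers operators _hdom hpre
  unfold Spec_minus_operation
  have hne : numbers ≠ [] := hpre.1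
  have hn : 1 ≤ numbers.length := List.length_pos_iff.mpr hne
  apply Prod.ext
  · rw [A_norm, B_norm, main_invariant]
    have : numbers.length - 1 + 1 = numbers.length := by omega
    rw [this]
  · show stripMinusA operators = operators.filter (fun o => o != "-")
    exact stripMinusA_eq_filter operators
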